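-- pv_equiv track=rewrite | github.com/gargshiva/Python-DataStructureAlgo | undirectedgraph/MostConnectedNode.py | nodes_representation
-- ===== SOURCE A (Python) =====
-- def nodes_representation(arr):
--     in_degree_nodes = {}
--     max_var = -1
--     nodes = []
--     for i in arr:
--         n1 = i[0]
--         n2 = i[1]
--
--         if in_degree_nodes.get(n1) is not None:
--             count = in_degree_nodes.get(n1)
--             in_degree_nodes[n1] = count + 1
--             if max_var < count + 1:
--                 max_var = count + 1
--         else:
--             in_degree_nodes[n1] = 1
--             if max_var < 1:
--                 max_var = 1
--
--         if in_degree_nodes.get(n2) is not None: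
--             count = in_degree_nodes.get(n2)
--             in_degree_nodes[n2] = count + 1
--             if max_var < count + 1:
--                 max_var = count + 1
--         else:
--             in_degree_nodes[n2] = 1
--             if max_var < 1:
--                 max_var = 1
--
--     for i in in_degree_nodes:
--         if in_degree_nodes.get(i) == max_var:
--             nodes.append(i)
--
--     nodes.sort()
--     return nodes[0], max_var
-- ===== SOURCE B (Python) =====
-- def nodes_representation(arr):
--     nodes = sorted(x for e in arr for x in e)
--     best_node, best_len = nodes[0], 0
--     i = 0
--     while i < len(nodes):
--         j = i
--         while j < len(nodes) and nodes[j] == nodes[i]: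
--             j += 1
--         if j - i > best_len:
--             best_node, best_len = nodes[i], j - i
--         i = j
--     return best_node, best_len
-- ===== Notes on version B (the rewrite author's own statement) =====
-- stated objective: alternative
-- what changed: B abandons the degree dictionary, running max, and collect-and-sort of candidates: it sorts all edge endpoints into one list and scans runs of equal values, the first strictly-longest run giving the smallest most-connected node and its degree.
import Mathlib
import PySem

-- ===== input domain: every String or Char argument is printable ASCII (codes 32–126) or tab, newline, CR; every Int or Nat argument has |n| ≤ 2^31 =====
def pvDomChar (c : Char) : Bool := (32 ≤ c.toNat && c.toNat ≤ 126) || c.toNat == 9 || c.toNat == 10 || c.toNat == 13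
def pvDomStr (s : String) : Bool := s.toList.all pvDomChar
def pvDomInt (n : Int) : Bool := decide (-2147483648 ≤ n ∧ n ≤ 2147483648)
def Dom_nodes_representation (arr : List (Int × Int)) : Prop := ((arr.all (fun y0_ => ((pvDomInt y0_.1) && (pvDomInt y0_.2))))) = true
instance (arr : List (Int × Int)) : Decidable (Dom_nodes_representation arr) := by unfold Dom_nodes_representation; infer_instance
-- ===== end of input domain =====

-- B replaces A's dict-of-degrees + running max + collect-and-sort by a different algorithm:
-- sort ALL endpoints once, then scan runs of equal values (a run's length is that node's degree);
-- the first strictly-longest run gives the smallest most-connected node. Objective: alternative.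

-- ===== PORT A =====
def nodes_representation (arr : List (Int × Int)) : Int × Int :=
  let st := arr.foldl (fun (st : PySem.Dict Int Int × Int) i =>
    let n1 := i.1
    let n2 := i.2
    let st1 :=
      match st.1.get? n1 with
      | some count => (st.1.insert n1 (count + 1), if st.2 < count + 1 then count + 1 else st.2)
      | none => (st.1.insert n1 1, if st.2 < 1 then 1 else st.2)
    match st1.1.get? n2 with
    | some count => (st1.1.insert n2 (count + 1), if st1.2 < count + 1 then count + 1 else st1.2)
    | none => (st1.1.insert n2 1, if st1.2 < 1 then 1 else st1.2))
    (PySem.Dict.empty, -1)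
  let max_var := st.2
  let nodes := st.1.keys.filter (fun k => st.1.get? k == some max_var)
  let nodes := PySem.List.sorted nodes (fun x => x) false
  (PySem.List.pyGetD nodes 0 0, max_var)    -- nodes[0]: IndexError on empty arr, excluded by Pre_

-- ===== PORT B =====
-- inner while loop: number of leading elements of t equal to x (run continues)
def pvRun (x : Int) : List Int → Nat
  | [] => 0
  | y :: t => if y == x then 1 + pvRun x t else 0

-- outer while loop: advance run by run, keeping (best_node, best_len)
def pvScan : List Int → Int → Int → Int × Int
  | [], bn, bl => (bn, bl)
  | x :: t, bn, bl =>
    if ((pvRun x t : Int) + 1) > bl then pvScan (t.drop (pvRun x t)) x ((pvRun x t : Int) + 1)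
    else pvScan (t.drop (pvRun x t)) bn bl
termination_by s => s.length
decreasing_by all_goals simp [List.length_drop]

def nodes_representation_alt (arr : List (Int × Int)) : Int × Int :=
  let nodes := PySem.List.sorted (arr.flatMap (fun e => [e.1, e.2])) (fun x => x) false
  pvScan nodes (PySem.List.pyGetD nodes 0 0) 0    -- nodes[0]: IndexError on empty arr, excluded by Pre_

-- ===== PRECONDITION & SPEC =====
-- Pre_ excludes only the empty list, on which A raises IndexError (as does B).
def Pre_nodes_representation (arr : List (Int × Int)) : Prop := arr ≠ []
instance (arr : List (Int × Int)) : Decidable (Pre_nodes_representation arr) := by unfold Pre_nodes_representation; infer_instance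
def pvWitness_nodes_representation : (List (Int × Int)) := [(1, 2)]
def Spec_nodes_representation (arr : List (Int × Int)) (out : Int × Int) : Prop := out = nodes_representation_alt arr
instance (arr : List (Int × Int)) (out : Int × Int) : Decidable (Spec_nodes_representation arr out) := by unfold Spec_nodes_representation; infer_instance

-- ===== CLAIM (what is proved, stated in full; the proofs are below) =====
def Claim_equal_nodes_representation : Prop := ∀ (arr : List (Int × Int)), Dom_nodes_representation arr → Pre_nodes_representation arr → Spec_nodes_representation arr (nodes_representation arr)

-- ===== LEMMAS AND PROOFS =====

-- ---- A-side characterization (degree counter + running max) ----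
def pvAStep (st : PySem.Dict Int Int × Int) (x : Int) : PySem.Dict Int Int × Int :=
  (st.1.insert x (st.1.getD x 0 + 1), max st.2 (st.1.getD x 0 + 1))
def pvCStep (d : PySem.Dict Int Int) (x : Int) : PySem.Dict Int Int :=
  d.insert x (d.getD x 0 + 1)
def pvFlat (arr : List (Int × Int)) : List Int := arr.flatMap (fun e => [e.1, e.2])
def pvMX (p : List Int) : Int :=
  ((PySem.Set.ofList p).map (fun k => (p.count k : Int))).foldl max (-1)

lemma pvAStep_eq (st : PySem.Dict Int Int × Int) (x : Int) :
    (match st.1.get? x with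
      | some count => (st.1.insert x (count + 1), if st.2 < count + 1 then count + 1 else st.2)
      | none => (st.1.insert x 1, if st.2 < 1 then 1 else st.2)) = pvAStep st x := by
  cases h : st.1.get? x with
  | some c =>
    have hg : st.1.getD x 0 = c := PySem.Dict.getD_of_get?_eq_some _ 0 h
    simp only [pvAStep, hg, Prod.mk.injEq]
    refine ⟨by trivial, ?_⟩
    rw [max_def]; split_ifs <;> omega
  | none =>
    have hg : st.1.getD x 0 = 0 := PySem.Dict.getD_of_get?_eq_none _ 0 h
    simp only [pvAStep, hg, Prod.mk.injEq]
    refine ⟨by norm_num, ?_⟩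
    rw [max_def]; split_ifs <;> omega

lemma pvA_fold_flat (arr : List (Int × Int)) (st : PySem.Dict Int Int × Int) :
    arr.foldl (fun (st : PySem.Dict Int Int × Int) i =>
      let n1 := i.1
      let n2 := i.2
      let st1 :=
        match st.1.get? n1 with
        | some count => (st.1.insert n1 (count + 1), if st.2 < count + 1 then count + 1 else st.2)
        | none => (st.1.insert n1 1, if st.2 < 1 then 1 else st.2)
      match st1.1.get? n2 with
      | some count => (st1.1.insert n2 (count + 1), if st1.2 < count + 1 then count + 1 else st1.2)
      | none => (st1.1.insert n2 1, if st1.2 < 1 then 1 else st1.2)) st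
    = (pvFlat arr).foldl pvAStep st := by
  induction arr generalizing st with
  | nil => rfl
  | cons e arr ih =>
    simp only [List.foldl_cons, pvFlat, List.flatMap_cons, List.cons_append, List.nil_append]
    rw [ih]
    simp only [pvFlat]
    rw [pvAStep_eq st e.1, pvAStep_eq (pvAStep st e.1) e.2]

lemma pvCStep_counter (p : List Int) (x : Int) :
    pvCStep (PySem.Dict.counter p) x = PySem.Dict.counter (p ++ [x]) := by
  rw [← PySem.Dict.foldl_insert_getD_add_one_eq_counter p,
    ← PySem.Dict.foldl_insert_getD_add_one_eq_counter (p ++ [x]), List.foldl_append]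
  rfl

lemma pv_foldl_max_unique (l : List Int) (a F : Int) (h1 : a ≤ F) (h2 : ∀ v ∈ l, v ≤ F)
    (h3 : F = a ∨ F ∈ l) : l.foldl max a = F := by
  obtain ⟨ha, hall⟩ := PySem.List.le_foldl_max l a
  apply le_antisymm
  · rcases PySem.List.foldl_max_mem l a with h | h
    · rw [h]; exact h1
    · exact h2 _ h
  · rcases h3 with h | h
    · rw [h]; exact ha
    · exact hall _ h

lemma pvMX_append (p : List Int) (x : Int) :
    pvMX (p ++ [x]) = max (pvMX p) ((p.count x : Int) + 1) := by
  have hOm1 : (-1 : Int) ≤ pvMX p := (PySem.List.le_foldl_max _ _).1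
  have hOall : ∀ v ∈ (PySem.Set.ofList p).map (fun k => (p.count k : Int)), v ≤ pvMX p :=
    (PySem.List.le_foldl_max _ _).2
  conv_lhs => unfold pvMX
  apply pv_foldl_max_unique
  · exact le_trans hOm1 (le_max_left _ _)
  · intro v hv
    obtain ⟨k, hk, rfl⟩ := List.mem_map.1 hv
    have hkpx : k ∈ p ++ [x] := (PySem.Set.mem_ofList _ _).1 hk
    by_cases hkx : k = x
    · subst hkx
      have hc : (p ++ [k]).count k = p.count k + 1 := by
        rw [List.count_append]; simp
      rw [hc]; push_cast
      exact le_max_right _ _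
    · have h0 : List.count k [x] = 0 := List.count_eq_zero.2 (by simp [hkx])
      have hc : (p ++ [x]).count k = p.count k := by
        rw [List.count_append, h0, Nat.add_zero]
      rw [hc]
      refine le_trans ?_ (le_max_left _ _)
      apply hOall
      refine List.mem_map.2 ⟨k, (PySem.Set.mem_ofList _ _).2 ?_, rfl⟩
      rcases List.mem_append.1 hkpx with h | h
      · exact h
      · exact absurd (by simpa using h) hkx
  · right
    by_cases hle : pvMX p ≤ (p.count x : Int) + 1
    · rw [max_eq_right hle]
      refine List.mem_map.2 ⟨x, (PySem.Set.mem_ofList _ _).2 (by simp), ?_⟩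
      have hc : (p ++ [x]).count x = p.count x + 1 := by
        rw [List.count_append]; simp
      rw [hc]; push_cast; ring
    · rw [not_le] at hle
      rw [max_eq_left (le_of_lt hle)]
      have hmem : pvMX p ∈ (PySem.Set.ofList p).map (fun k => (p.count k : Int)) := by
        rcases PySem.List.foldl_max_mem
            ((PySem.Set.ofList p).map (fun k => (p.count k : Int))) (-1) with h | h
        · exfalso
          have hpv : pvMX p = -1 := h
          have : (0 : Int) ≤ (p.count x : Int) := Int.natCast_nonneg _
          omega
        · exact h
      obtain ⟨k, hk, hkv⟩ := List.mem_map.1 hmem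
      have hkx : k ≠ x := by
        intro h; subst h
        rw [← hkv] at hle
        have : (0 : Int) ≤ (p.count k : Int) := Int.natCast_nonneg _
        omega
      refine List.mem_map.2 ⟨k, (PySem.Set.mem_ofList _ _).2
        (List.mem_append.2 (Or.inl ((PySem.Set.mem_ofList _ _).1 hk))), ?_⟩
      have h0 : List.count k [x] = 0 := List.count_eq_zero.2 (by simp [hkx])
      rw [← hkv]
      congr 1
      rw [List.count_append, h0, Nat.add_zero]

lemma pvA_fold_fst (L : List Int) (d : PySem.Dict Int Int) (mv : Int) :
    (L.foldl pvAStep (d, mv)).1 = L.foldl pvCStep d := by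
  induction L generalizing d mv with
  | nil => rfl
  | cons x L ih =>
    simp only [List.foldl_cons]
    exact ih _ _

lemma pv_fold_cstep (L : List Int) : L.foldl pvCStep PySem.Dict.empty = PySem.Dict.counter L := by
  rw [← PySem.Dict.foldl_insert_getD_add_one_eq_counter]
  rfl

lemma pvA_fold_snd (L p : List Int) :
    (L.foldl pvAStep (PySem.Dict.counter p, pvMX p)).2 = pvMX (p ++ L) := by
  induction L generalizing p with
  | nil => simp
  | cons x L ih =>
    have h1 : pvAStep (PySem.Dict.counter p, pvMX p) x
        = (PySem.Dict.counter (p ++ [x]), pvMX (p ++ [x])) := by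
      unfold pvAStep
      rw [pvMX_append]
      refine Prod.ext ?_ ?_
      · show pvCStep (PySem.Dict.counter p) x = _
        rw [pvCStep_counter]
      · show max (pvMX p) ((PySem.Dict.counter p).getD x 0 + 1) = _
        rw [PySem.Dict.getD_counter]
    rw [List.foldl_cons, h1, ih (p ++ [x])]
    simp

lemma pvA_nodes (L : List Int) (m : Int) :
    (PySem.Dict.counter L).keys.filter (fun k => (PySem.Dict.counter L).get? k == some m)
      = (PySem.Set.ofList L).filter (fun k => (L.count k : Int) == m) := by
  rw [PySem.Dict.keys_counter]
  apply List.filter_congr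
  intro k hk
  have hget : (PySem.Dict.counter L).get? k = some ((L.count k : Int)) := by
    apply PySem.Dict.get?_of_mem_items
    · rw [PySem.Dict.items_counter]
      exact List.mem_map.2 ⟨k, hk, rfl⟩
    · exact PySem.Dict.nodup_keys_counter L
  rw [hget]
  simp

lemma pv_head_sorted_eq_min (ns : List Int) (hns : ns ≠ []) :
    PySem.List.pyGetD (PySem.List.sorted ns (fun x => x) false) 0 0
      = (PySem.List.min? ns (fun n => n)).getD 0 := by
  obtain ⟨m, t, hs⟩ : ∃ m t, PySem.List.sorted ns (fun x => x) false = m :: t := by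
    cases hc : PySem.List.sorted ns (fun x => x) false with
    | nil => exact absurd ((PySem.List.sorted_eq_nil_iff _ _ _).1 hc) hns
    | cons m t => exact ⟨m, t, rfl⟩
  obtain ⟨n, hn⟩ : ∃ n, PySem.List.min? ns (fun n => n) = some n := by
    cases hc : PySem.List.min? ns (fun n => n) with
    | none => exact absurd ((PySem.List.min?_eq_none_iff _ _).1 hc) hns
    | some n => exact ⟨n, rfl⟩
  rw [hs, hn, PySem.List.pyGetD_zero_cons]
  have hmem_m : m ∈ ns := by
    have hm : m ∈ PySem.List.sorted ns (fun x => x) false := by rw [hs]; simp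
    exact (PySem.List.mem_sorted _ _ _ _).1 hm
  have hmn : m ≤ n := PySem.List.key_head_sorted_le _ _ hs n (PySem.List.min?_mem hn)
  have hnm : n ≤ m := PySem.List.min?_isMin hn m hmem_m
  show m = (some n).getD 0
  simp only [Option.getD_some]
  omega

-- ---- B-side: run decomposition of a sorted list ----
lemma pv_sorted_run (x : Int) (t : List Int) (h : (x :: t).Pairwise (fun a b => a ≤ b)) :
    (x :: t).count x = pvRun x t + 1
    ∧ (t.drop (pvRun x t)).Pairwise (fun a b => a ≤ b)
    ∧ (∀ v ∈ t.drop (pvRun x t), x < v)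
    ∧ (∀ v, v ≠ x → (x :: t).count v = (t.drop (pvRun x t)).count v)
    ∧ (∀ v ∈ t, v = x ∨ v ∈ t.drop (pvRun x t)) := by
  induction t with
  | nil =>
    refine ⟨by simp [pvRun], by simp [pvRun], by simp [pvRun], ?_, by simp⟩
    intro v hv
    simp [pvRun, Ne.symm hv]
  | cons y s ih =>
    rw [List.pairwise_cons] at h
    obtain ⟨hx, hys⟩ := h
    by_cases hyx : y = x
    · subst hyx
      obtain ⟨c1, c2, c3, c4, c5⟩ := ih hys
      have hk : pvRun y (y :: s) = 1 + pvRun y s := by simp [pvRun]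
      have hdrop : (y :: s).drop (pvRun y (y :: s)) = s.drop (pvRun y s) := by
        rw [hk, Nat.add_comm, List.drop_succ_cons]
      refine ⟨?_, by rw [hdrop]; exact c2, by rw [hdrop]; exact c3, ?_, ?_⟩
      · rw [hk]
        have := c1
        simp only [List.count_cons_self] at this ⊢
        omega
      · intro v hv
        rw [hdrop]
        have := c4 v hv
        simp [Ne.symm hv] at this ⊢
        omega
      · intro v hv
        rw [hdrop]
        rcases List.mem_cons.1 hv with h | h
        · exact Or.inl h
        · exact c5 v h
    · have hk : pvRun x (y :: s) = 0 := by simp [pvRun, hyx]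
      have hnotin : x ∉ y :: s := by
        intro hmem
        rcases List.mem_cons.1 hmem with h | h
        · exact hyx h.symm
        · rw [List.pairwise_cons] at hys
          have h1 : y ≤ x := hys.1 x h
          have h2 : x ≤ y := hx y (List.mem_cons_self)
          exact hyx (le_antisymm h1 h2)
      rw [hk]
      simp only [List.drop_zero]
      refine ⟨?_, hys, ?_, ?_, fun v hv => Or.inr hv⟩
      · rw [List.count_cons_self, List.count_eq_zero.2 hnotin]
      · intro v hv
        exact lt_of_le_of_ne (hx v hv) (fun he => hnotin (he ▸ hv))
      · intro v hv
        simp [List.count_cons, Ne.symm hv]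

lemma pvScan_spec (n : Nat) : ∀ (s : List Int), s.length ≤ n →
    s.Pairwise (fun a b => a ≤ b) → ∀ (bn bl : Int),
    (bl ≤ (pvScan s bn bl).2)
    ∧ (∀ v ∈ s, ((s.count v : Nat) : Int) ≤ (pvScan s bn bl).2)
    ∧ ((pvScan s bn bl) = (bn, bl)
       ∨ ((pvScan s bn bl).1 ∈ s ∧ ((s.count (pvScan s bn bl).1 : Nat) : Int) = (pvScan s bn bl).2
          ∧ bl < (pvScan s bn bl).2
          ∧ ∀ v ∈ s, ((s.count v : Nat) : Int) = (pvScan s bn bl).2 → (pvScan s bn bl).1 ≤ v)) := by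
  induction n with
  | zero =>
    intro s hs _ bn bl
    have hnil : s = [] := List.eq_nil_of_length_eq_zero (Nat.le_zero.1 hs)
    subst hnil
    simp [pvScan]
  | succ n ih =>
    intro s hlen hsort bn bl
    match s with
    | [] => simp [pvScan]
    | x :: t =>
      obtain ⟨c1, c2, c3, c4, c5⟩ := pv_sorted_run x t hsort
      have hmemS : ∀ v ∈ t.drop (pvRun x t), v ∈ x :: t :=
        fun v hv => List.mem_cons_of_mem _ (List.mem_of_mem_drop hv)
      have hcx : (((x :: t).count x : Nat) : Int) = (pvRun x t : Int) + 1 := by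
        rw [c1]; push_cast; ring
      have hrl : (t.drop (pvRun x t)).length ≤ n := by
        simp only [List.length_cons] at hlen
        simp only [List.length_drop]
        omega
      have hcrest : ∀ v ∈ t.drop (pvRun x t),
          (((x :: t).count v : Nat) : Int) = (((t.drop (pvRun x t)).count v : Nat) : Int) := by
        intro v hv
        have : v ≠ x := ne_of_gt (c3 v hv)
        rw [c4 v this]
      by_cases hgt : ((pvRun x t : Int) + 1) > bl
      · have hunf : pvScan (x :: t) bn bl
            = pvScan (t.drop (pvRun x t)) x ((pvRun x t : Int) + 1) := by
          rw [pvScan]; rw [if_pos hgt]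
        obtain ⟨d1, d2, d3⟩ := ih (t.drop (pvRun x t)) hrl c2 x ((pvRun x t : Int) + 1)
        set q := pvScan (t.drop (pvRun x t)) x ((pvRun x t : Int) + 1) with hq
        rw [hunf]
        have hallc : ∀ v ∈ x :: t, (((x :: t).count v : Nat) : Int) ≤ q.2 := by
          intro v hv
          rcases List.mem_cons.1 hv with rfl | hvt
          · rw [hcx]; exact d1
          · rcases c5 v hvt with rfl | hvr
            · rw [hcx]; exact d1
            · rw [hcrest v hvr]; exact d2 v hvr
        refine ⟨le_trans (le_of_lt hgt) d1, hallc, Or.inr ?_⟩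
        rcases d3 with heq | ⟨e1, e2, e3, e4⟩
        · -- q = (x, k+1)
          rw [heq]
          refine ⟨List.mem_cons_self, by rw [hcx], hgt, ?_⟩
          intro v hv _
          rcases List.mem_cons.1 hv with rfl | hvt
          · exact le_refl _
          · rcases c5 v hvt with rfl | hvr
            · exact le_refl _
            · exact le_of_lt (c3 v hvr)
        · refine ⟨hmemS _ e1, ?_, lt_trans hgt e3, ?_⟩
          · rw [hcrest _ e1]; exact e2
          · intro v hv hcv
            rcases List.mem_cons.1 hv with rfl | hvt
            · exfalso; rw [hcx] at hcv; omega
            · rcases c5 v hvt with rfl | hvr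
              · exfalso; rw [hcx] at hcv; omega
              · exact e4 v hvr (by rw [← hcrest v hvr]; exact hcv)
      · have hunf : pvScan (x :: t) bn bl = pvScan (t.drop (pvRun x t)) bn bl := by
          rw [pvScan]; rw [if_neg hgt]
        obtain ⟨d1, d2, d3⟩ := ih (t.drop (pvRun x t)) hrl c2 bn bl
        set q := pvScan (t.drop (pvRun x t)) bn bl with hq
        rw [hunf]
        have hxle : (((x :: t).count x : Nat) : Int) ≤ bl := by rw [hcx]; omega
        have hallc : ∀ v ∈ x :: t, (((x :: t).count v : Nat) : Int) ≤ q.2 := by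
          intro v hv
          rcases List.mem_cons.1 hv with rfl | hvt
          · exact le_trans hxle d1
          · rcases c5 v hvt with rfl | hvr
            · exact le_trans hxle d1
            · rw [hcrest v hvr]; exact d2 v hvr
        refine ⟨d1, hallc, ?_⟩
        rcases d3 with heq | ⟨e1, e2, e3, e4⟩
        · exact Or.inl heq
        · refine Or.inr ⟨hmemS _ e1, by rw [hcrest _ e1]; exact e2, e3, ?_⟩
          intro v hv hcv
          rcases List.mem_cons.1 hv with rfl | hvt
          · exfalso; have := lt_of_le_of_lt hxle e3; omega
          · rcases c5 v hvt with rfl | hvr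
            · exfalso; have := lt_of_le_of_lt hxle e3; omega
            · exact e4 v hvr (by rw [← hcrest v hvr]; exact hcv)

-- ---- putting both characterizations together ----
lemma pv_main (L : List Int) (hL : L ≠ []) :
    (PySem.List.pyGetD (PySem.List.sorted
        ((PySem.Set.ofList L).filter (fun k => ((L.count k : Nat) : Int) == pvMX L))
        (fun x => x) false) 0 0, pvMX L)
    = pvScan (PySem.List.sorted L (fun x => x) false)
        (PySem.List.pyGetD (PySem.List.sorted L (fun x => x) false) 0 0) 0 := by
  set s := PySem.List.sorted L (fun x => x) false with hs
  have hperm : s.Perm L := PySem.List.sorted_perm L (fun x => x) false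
  have hsort : s.Pairwise (fun a b => a ≤ b) := by
    have := PySem.List.sorted_pairwise (xs := L) (key := fun x => x)
    simpa using this
  have hcount : ∀ v : Int, s.count v = L.count v := fun v => hperm.count_eq v
  have hmemeq : ∀ v : Int, v ∈ s ↔ v ∈ L := fun v => hperm.mem_iff
  obtain ⟨w, hw⟩ : ∃ w, w ∈ L := List.exists_mem_of_ne_nil L hL
  have hws : w ∈ s := (hmemeq w).2 hw
  have hcw : 1 ≤ s.count w := List.count_pos_iff.2 hws
  obtain ⟨p1, p2, p3⟩ := pvScan_spec s.length s le_rfl hsort (PySem.List.pyGetD s 0 0) 0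
  set q := pvScan s (PySem.List.pyGetD s 0 0) 0 with hq
  have hq2pos : (1 : Int) ≤ q.2 := le_trans (by exact_mod_cast hcw) (p2 w hws)
  rcases p3 with heq | ⟨e1, e2, e3, e4⟩
  · exfalso
    rw [heq] at hq2pos
    simp at hq2pos
  · have hmx : pvMX L = q.2 := by
      unfold pvMX
      apply pv_foldl_max_unique
      · omega
      · intro v hv
        obtain ⟨k, hk, rfl⟩ := List.mem_map.1 hv
        have hkL : k ∈ L := (PySem.Set.mem_ofList _ _).1 hk
        rw [← hcount k]
        exact p2 k ((hmemeq k).2 hkL)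
      · right
        refine List.mem_map.2 ⟨q.1, (PySem.Set.mem_ofList _ _).2 ((hmemeq _).1 e1), ?_⟩
        rw [← hcount]
        exact e2
    have hq1ns : q.1 ∈ (PySem.Set.ofList L).filter (fun k => ((L.count k : Nat) : Int) == pvMX L) := by
      refine List.mem_filter.2 ⟨(PySem.Set.mem_ofList _ _).2 ((hmemeq _).1 e1), ?_⟩
      rw [hmx, ← hcount]
      simpa using e2
    have hns : (PySem.Set.ofList L).filter (fun k => ((L.count k : Nat) : Int) == pvMX L) ≠ [] :=
      List.ne_nil_of_mem hq1ns
    rw [pv_head_sorted_eq_min _ hns]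
    cases hmin : PySem.List.min? ((PySem.Set.ofList L).filter
        (fun k => ((L.count k : Nat) : Int) == pvMX L)) (fun n => n) with
    | none => exact absurd ((PySem.List.min?_eq_none_iff _ _).1 hmin) hns
    | some n =>
      have hn_ns := PySem.List.min?_mem hmin
      have hle1 : n ≤ q.1 := PySem.List.min?_isMin hmin q.1 hq1ns
      have hle2 : q.1 ≤ n := by
        obtain ⟨hnL, hcn⟩ := List.mem_filter.1 hn_ns
        refine e4 n ((hmemeq n).2 ((PySem.Set.mem_ofList _ _).1 hnL)) ?_
        rw [hcount, ← hmx]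
        simpa using hcn
      have hqn : q.1 = n := le_antisymm hle2 hle1
      rw [hmx, ← hqn]
      rfl

-- ===== VERDICT (by name: the statement is the Claim_ definition above) =====
theorem nodes_representation_spec : Claim_equal_nodes_representation := by
  intro arr _ hpre
  unfold Spec_nodes_representation nodes_representation nodes_representation_alt
  have hL : pvFlat arr ≠ [] := by
    cases arr with
    | nil => exact absurd rfl hpre
    | cons e t => simp [pvFlat]
  have h2 := pvA_fold_snd (pvFlat arr) []
  rw [show PySem.Dict.counter ([] : List Int) = PySem.Dict.empty from rfl,
      show pvMX [] = (-1 : Int) from rfl, List.nil_append] at h2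
  simp only [pvA_fold_flat, pvA_fold_fst, pv_fold_cstep, h2, pvA_nodes]
  exact pv_main (pvFlat arr) hL
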